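-- pv_equiv track=rewrite | github.com/ebouther/ComputerV1 | main.py | negative_pow
-- ===== SOURCE A (Python) =====
-- def negative_pow(eq):
--     neg = 0;
--     for i in range(len(eq[0])):
--         if (eq[0][i][1] < 0):
--             neg = 1;
--             deg = eq[0][i][1] * -1;
--             eq[0][i][1] = 0;
--             for n in range(len(eq[0])):
--                 if (n != i):
--                     eq[0][n][1] += deg;
--             for n in range(len(eq[1])):
--                 eq[1][n][1] += deg;
--     return neg;
-- ===== SOURCE B (Python) =====
-- def negative_pow(eq):
--     m = 0
--     for term in eq[0]:
--         if term[1] < m: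
--             m = term[1]
--     if m >= 0:
--         return 0
--     for term in eq[0]:
--         term[1] -= m
--     for term in eq[1]:
--         term[1] -= m
--     return 1
-- ===== Notes on version B (the rewrite author's own statement) =====
-- stated objective: simpler
-- what changed: B computes the minimum degree in one scan and, if negative, applies a single uniform shift to both sides, instead of A's repeated per-term zero-and-shift passes (quadratic in the worst case).
import Mathlib
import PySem

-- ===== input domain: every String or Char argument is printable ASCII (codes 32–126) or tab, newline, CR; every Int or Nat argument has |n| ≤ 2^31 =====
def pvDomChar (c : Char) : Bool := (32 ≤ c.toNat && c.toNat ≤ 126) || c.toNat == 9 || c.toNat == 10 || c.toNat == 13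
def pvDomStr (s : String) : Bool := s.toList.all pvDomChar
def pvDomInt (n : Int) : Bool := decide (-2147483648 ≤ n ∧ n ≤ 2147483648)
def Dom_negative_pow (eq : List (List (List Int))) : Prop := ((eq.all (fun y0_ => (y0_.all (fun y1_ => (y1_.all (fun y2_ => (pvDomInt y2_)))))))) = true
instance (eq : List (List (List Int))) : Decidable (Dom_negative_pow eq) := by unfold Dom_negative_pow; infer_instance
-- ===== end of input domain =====

-- B replaces A's repeated in-place degree shifting by one min-scan plus one uniform shift; the Python B
-- performs the same net list mutation as A, and the equivalence proved here is about the return value.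

-- ===== PORT A =====
-- helper for Python's `eq[_][n][1] += deg`
def pvBump (t : List Int) (d : Int) : List Int := t.set 1 (t.getD 1 0 + d)

-- body of A's inner `for n in range(len(eq[0])): if n != i: eq[0][n][1] += deg`
def pvBumpStep (i : Nat) (d : Int) (acc : List (List Int)) (n : Nat) : List (List Int) :=
  if n ≠ i then acc.set n (pvBump (acc.getD n []) d) else acc

def pvStepA (s : List (List Int) × List (List Int) × Int) (i : Nat) :
    List (List Int) × List (List Int) × Int :=
  match s with
  | (e0, e1, neg) =>
    let ti := e0.getD i []
    if ti.getD 1 0 < 0 then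
      let deg := ti.getD 1 0 * (-1)
      let e0' := e0.set i (ti.set 1 0)
      let e0'' := (List.range e0'.length).foldl (pvBumpStep i deg) e0'
      let e1' := (List.range e1.length).foldl
        (fun acc n => acc.set n (pvBump (acc.getD n []) deg)) e1
      (e0'', e1', 1)
    else (e0, e1, neg)

def negative_pow (eq : List (List (List Int))) : Int :=
  let e0 := eq.getD 0 []
  let e1 := eq.getD 1 []
  ((List.range e0.length).foldl pvStepA (e0, e1, 0)).2.2

-- ===== PORT B =====
def negative_pow_alt (eq : List (List (List Int))) : Int :=
  let e0 := eq.getD 0 []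
  let m : Int := e0.foldl (fun a t => if t.getD 1 0 < a then t.getD 1 0 else a) 0
  if 0 ≤ m then 0 else 1

-- ===== PRECONDITION & SPEC =====
-- Pre_ is exactly where Python A returns normally: eq nonempty (A reads eq[0]); every term of
-- eq[0] has a degree slot t[1]; and when some degree is negative (so a shift happens) A also
-- reads eq[1] and each of its terms' t[1].
def Pre_negative_pow (eq : List (List (List Int))) : Prop :=
  eq ≠ [] ∧ (∀ t ∈ eq.getD 0 [], 2 ≤ t.length) ∧
    ((∃ t ∈ eq.getD 0 [], t.getD 1 0 < 0) →
      (2 ≤ eq.length ∧ ∀ t ∈ eq.getD 1 [], 2 ≤ t.length))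
instance (eq : List (List (List Int))) : Decidable (Pre_negative_pow eq) := by
  unfold Pre_negative_pow; infer_instance

def pvWitness_negative_pow : List (List (List Int)) := [[[1, -2], [3, 1]], [[4, 0]]]

def Spec_negative_pow (eq : List (List (List Int))) (out : Int) : Prop := out = negative_pow_alt eq
instance (eq : List (List (List Int))) (out : Int) : Decidable (Spec_negative_pow eq out) := by unfold Spec_negative_pow; infer_instance

-- ===== CLAIM (what is proved, stated in full; the proofs are below) =====
def Claim_equal_negative_pow : Prop := ∀ (eq : List (List (List Int))), Dom_negative_pow eq → Pre_negative_pow eq → Spec_negative_pow eq (negative_pow eq)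

-- ===== LEMMAS AND PROOFS =====

theorem pvBump_len (t : List Int) (d : Int) : (pvBump t d).length = t.length := by
  simp [pvBump]

theorem pvBump_deg (t : List Int) (d : Int) (h : 2 ≤ t.length) :
    (pvBump t d).getD 1 0 = t.getD 1 0 + d := by
  unfold pvBump
  rw [List.getD_eq_getElem?_getD, List.getElem?_set_self (by omega)]
  rfl

theorem pvGetD_set_self (l : List (List Int)) (i : Nat) (v : List Int) (h : i < l.length) :
    (l.set i v).getD i [] = v := by
  rw [List.getD_eq_getElem?_getD, List.getElem?_set_self h]
  rfl

theorem pvGetD_set_ne (l : List (List Int)) (i k : Nat) (v : List Int) (h : i ≠ k) :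
    (l.set i v).getD k [] = l.getD k [] := by
  rw [List.getD_eq_getElem?_getD, List.getElem?_set_ne h, ← List.getD_eq_getElem?_getD]

theorem pvDeg_set (t : List Int) (v : Int) (h : 2 ≤ t.length) : (t.set 1 v).getD 1 0 = v := by
  rw [List.getD_eq_getElem?_getD, List.getElem?_set_self (by omega)]
  rfl

-- characterization of the inner bump loop of A
theorem pvBump_fold (l : List (List Int)) (i : Nat) (d : Int) (m : Nat) :
    ((List.range m).foldl (pvBumpStep i d) l).length = l.length ∧
    ∀ k, ((List.range m).foldl (pvBumpStep i d) l).getD k []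
        = if k < m ∧ k ≠ i then pvBump (l.getD k []) d else l.getD k [] := by
  induction m with
  | zero => simp
  | succ m ih =>
    obtain ⟨ihl, ihg⟩ := ih
    rw [List.range_succ, List.foldl_append, List.foldl_cons, List.foldl_nil]
    set r := (List.range m).foldl (pvBumpStep i d) l with hr
    unfold pvBumpStep
    constructor
    · split
      · simp [ihl]
      · exact ihl
    · intro k
      split
      · rename_i hmi
        by_cases hk : k = m
        · subst hk
          by_cases hkl : k < l.length
          · rw [List.getD_eq_getElem?_getD, List.getElem?_set_self (by rw [ihl]; omega),
              Option.getD_some, ihg k, if_neg (by omega)]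
            simp [hkl, hmi]
          · rw [List.set_eq_of_length_le (by rw [ihl]; omega), ihg k, if_neg (by omega),
              if_pos ⟨by omega, hmi⟩]
            have hnil : l.getD k [] = [] := by
              rw [List.getD_eq_getElem?_getD, List.getElem?_eq_none (by omega)]
              rfl
            rw [hnil]
            rfl
        · rw [List.getD_eq_getElem?_getD, List.getElem?_set_ne (by omega),
            ← List.getD_eq_getElem?_getD, ihg k]
          by_cases hP : k < m ∧ k ≠ i
          · rw [if_pos hP, if_pos ⟨by omega, hP.2⟩]
          · rw [if_neg hP, if_neg (by omega)]
      · rename_i hmi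
        rw [ihg k]
        by_cases h1 : k < m ∧ k ≠ i
        · rw [if_pos h1, if_pos ⟨by omega, h1.2⟩]
        · rw [if_neg h1, if_neg (by omega)]

-- the invariant of A's outer loop: after i steps the degrees of eq[0] are the originals
-- shifted by a common S ≥ 0, and A's flag is 1 exactly when S > 0, which happens exactly
-- when one of the first i original degrees is negative.
theorem pvA_inv (e0 e1 : List (List Int)) (h2 : ∀ t ∈ e0, 2 ≤ t.length)
    (i : Nat) (hi : i ≤ e0.length) :
    ∃ S A B, (List.range i).foldl pvStepA (e0, e1, 0) = (A, B, if S = 0 then (0:Int) else 1) ∧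
      0 ≤ S ∧ A.length = e0.length ∧
      (∀ k, (A.getD k []).length = (e0.getD k []).length) ∧
      (∀ k < e0.length, (A.getD k []).getD 1 0 = (e0.getD k []).getD 1 0 + S) ∧
      ((0 < S) ↔ (∃ k < i, (e0.getD k []).getD 1 0 < 0)) := by
  have hlen : ∀ k, k < e0.length → 2 ≤ (e0.getD k []).length := by
    intro k hk
    rw [List.getD_eq_getElem?_getD, List.getElem?_eq_getElem hk]
    exact h2 _ (List.getElem_mem hk)
  induction i with
  | zero =>
    refine ⟨0, e0, e1, by simp, le_rfl, rfl, fun k => rfl, fun k _ => by omega, by simp⟩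
  | succ i ih =>
    obtain ⟨S, A, B, heq, hS, hAl, hAtl, hAd, hSiff⟩ := ih (by omega)
    rw [List.range_succ, List.foldl_append, heq, List.foldl_cons, List.foldl_nil]
    have hil : i < e0.length := by omega
    have hdi : (A.getD i []).getD 1 0 = (e0.getD i []).getD 1 0 + S := hAd i hil
    have hd2i : 2 ≤ (A.getD i []).length := by rw [hAtl i]; exact hlen i hil
    unfold pvStepA
    simp only
    by_cases hneg : (A.getD i []).getD 1 0 < 0
    · rw [if_pos hneg]
      have hd0neg : (e0.getD i []).getD 1 0 < 0 := by omega
      refine ⟨-(e0.getD i []).getD 1 0,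
        (List.range (A.set i ((A.getD i []).set 1 0)).length).foldl
          (pvBumpStep i ((A.getD i []).getD 1 0 * -1)) (A.set i ((A.getD i []).set 1 0)),
        (List.range B.length).foldl
          (fun acc n => acc.set n (pvBump (acc.getD n []) ((A.getD i []).getD 1 0 * -1))) B,
        by rw [if_neg (by omega)], by omega, ?_, ?_, ?_, ?_⟩
      · rw [(pvBump_fold _ i _ _).1]
        simp [hAl]
      · intro k
        rw [(pvBump_fold _ i _ _).2 k]
        split
        · rename_i hc
          rw [pvBump_len, pvGetD_set_ne _ _ _ _ (Ne.symm hc.2), hAtl k]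
        · by_cases hk : k = i
          · subst hk
            rw [pvGetD_set_self _ _ _ (by rw [hAl]; omega), List.length_set, hAtl k]
          · rw [pvGetD_set_ne _ _ _ _ (Ne.symm hk), hAtl k]
      · intro k hk
        rw [(pvBump_fold _ i _ _).2 k]
        by_cases hki : k = i
        · subst hki
          rw [if_neg (by simp), pvGetD_set_self _ _ _ (by rw [hAl]; omega),
            pvDeg_set _ _ hd2i]
          omega
        · rw [if_pos ⟨by simp [hAl]; omega, hki⟩, pvGetD_set_ne _ _ _ _ (Ne.symm hki),
            pvBump_deg _ _ (by rw [hAtl k]; exact hlen k hk), hAd k hk, hdi]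
          omega
      · exact ⟨fun _ => ⟨i, by omega, hd0neg⟩, fun _ => by omega⟩
    · rw [if_neg hneg]
      refine ⟨S, A, B, rfl, hS, hAl, hAtl, hAd, ?_⟩
      rw [hSiff]
      constructor
      · rintro ⟨k, hk, hkneg⟩
        exact ⟨k, by omega, hkneg⟩
      · rintro ⟨k, hk, hkneg⟩
        by_cases hki : k = i
        · subst hki
          have hSpos : 0 < S := by omega
          exact hSiff.mp hSpos
        · exact ⟨k, by omega, hkneg⟩

-- A's result is 1 iff some term of eq[0] has negative degree
theorem pvA_char (e0 e1 : List (List Int)) (h2 : ∀ t ∈ e0, 2 ≤ t.length) :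
    ((List.range e0.length).foldl pvStepA (e0, e1, 0)).2.2
      = if ∃ t ∈ e0, t.getD 1 0 < 0 then 1 else 0 := by
  obtain ⟨S, A, B, heq, hS, _, _, _, hSiff⟩ := pvA_inv e0 e1 h2 e0.length le_rfl
  rw [heq]
  have hmem : (∃ k < e0.length, (e0.getD k []).getD 1 0 < 0) ↔ ∃ t ∈ e0, t.getD 1 0 < 0 := by
    constructor
    · rintro ⟨k, hk, hkneg⟩
      have hg : e0.getD k [] = e0[k] := by
        rw [List.getD_eq_getElem?_getD, List.getElem?_eq_getElem hk]
        rfl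
      rw [hg] at hkneg
      exact ⟨e0[k], List.getElem_mem hk, hkneg⟩
    · rintro ⟨t, ht, htneg⟩
      obtain ⟨k, hk, rfl⟩ := List.mem_iff_getElem.mp ht
      have hg : e0.getD k [] = e0[k] := by
        rw [List.getD_eq_getElem?_getD, List.getElem?_eq_getElem hk]
        rfl
      exact ⟨k, hk, by rwa [hg]⟩
  simp only
  by_cases hex : ∃ t ∈ e0, t.getD 1 0 < 0
  · rw [if_pos hex]
    have hSpos : 0 < S := hSiff.mpr (hmem.mpr hex)
    rw [if_neg (by omega)]
  · rw [if_neg hex]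
    have hS0 : ¬ 0 < S := fun h => hex (hmem.mp (hSiff.mp h))
    rw [if_pos (by omega)]

-- B's min-fold is negative iff the seed is or some term's degree is
theorem pvMin_fold (l : List (List Int)) (c : Int) :
    (l.foldl (fun a t => if t.getD 1 0 < a then t.getD 1 0 else a) c < 0)
      ↔ (c < 0 ∨ ∃ t ∈ l, t.getD 1 0 < 0) := by
  induction l generalizing c with
  | nil => simp
  | cons t l ih =>
    simp only [List.foldl_cons, ih, List.mem_cons]
    constructor
    · rintro (h | ⟨u, hu, hun⟩)
      · split at h
        · exact Or.inr ⟨t, Or.inl rfl, h⟩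
        · exact Or.inl h
      · exact Or.inr ⟨u, Or.inr hu, hun⟩
    · rintro (h | ⟨u, (rfl | hu), hun⟩)
      · left; split <;> omega
      · left; split <;> omega
      · exact Or.inr ⟨u, hu, hun⟩

-- ===== VERDICT (by name: the statement is the Claim_ definition above) =====
theorem negative_pow_spec : Claim_equal_negative_pow := by
  intro eq _ hpre
  obtain ⟨_, h2, _⟩ := hpre
  unfold Spec_negative_pow
  simp only [negative_pow, negative_pow_alt]
  rw [pvA_char _ _ h2]
  have hmin := pvMin_fold (eq.getD 0 []) 0
  simp only [show ¬((0:Int) < 0) by omega, false_or] at hmin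
  by_cases hex : ∃ t ∈ eq.getD 0 [], t.getD 1 0 < 0
  · rw [if_pos hex]
    have hm : (eq.getD 0 []).foldl (fun a t => if t.getD 1 0 < a then t.getD 1 0 else a) 0 < 0 :=
      hmin.mpr hex
    rw [if_neg (by omega)]
  · rw [if_neg hex]
    have hm : ¬ (eq.getD 0 []).foldl (fun a t => if t.getD 1 0 < a then t.getD 1 0 else a) 0 < 0 :=
      fun h => hex (hmin.mp h)
    rw [if_pos (by omega)]
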